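-- pv_equiv track=rewrite | github.com/Theddi/DDA_PCG_TOAD_GAN | TOAD-GUI/utils/level_utils.py | create_base_slice
-- ===== SOURCE A (Python) =====
-- def create_base_slice(height, length):
--     # Create base level for time measurement
--     baseLevel = []
--     for h in range(height):
--         if h < height - 2:
--             baseLevel.append("-" * (length - 1) + "\n")
--         else:
--             baseLevel.append("X" * (length - 1) + "\n")
--     return baseLevel
-- ===== SOURCE B (Python) =====
-- def create_base_slice(height, length):
--     # Build the level bottom-up with a budget of 2 'X' rows spent first,
--     # then dash rows, and reverse at the end. No comparison against
--     # height - 2 is ever made: the loop state is a countdown budget.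
--     rows = []
--     x_budget = 2
--     remaining = height
--     while remaining > 0:
--         if x_budget > 0:
--             rows.append("X" * (length - 1) + "\n")
--             x_budget -= 1
--         else:
--             rows.append("-" * (length - 1) + "\n")
--         remaining -= 1
--     rows.reverse()
--     return rows
-- ===== Notes on version B (the rewrite author's own statement) =====
-- stated objective: alternative
-- what changed: Instead of iterating rows top-down and testing each index against height-2, B builds the level bottom-up with a countdown budget of 2 X rows (X rows emitted while the budget lasts, dash rows after) and reverses the list at the end; no index-vs-threshold comparison exists in B.
import Mathlib
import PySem

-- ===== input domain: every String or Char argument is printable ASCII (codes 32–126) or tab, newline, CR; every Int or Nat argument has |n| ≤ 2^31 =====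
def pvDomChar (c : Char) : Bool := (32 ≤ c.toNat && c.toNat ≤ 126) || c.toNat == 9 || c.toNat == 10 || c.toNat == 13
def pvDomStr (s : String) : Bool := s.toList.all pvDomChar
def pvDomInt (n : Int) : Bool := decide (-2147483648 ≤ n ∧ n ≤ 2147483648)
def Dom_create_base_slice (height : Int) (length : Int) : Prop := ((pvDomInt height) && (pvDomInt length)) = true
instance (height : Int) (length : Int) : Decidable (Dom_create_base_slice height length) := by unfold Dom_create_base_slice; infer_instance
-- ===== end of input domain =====

-- B builds the level bottom-up with a countdown budget of 2 X rows and reverses at the end (alternative decomposition; no index-vs-threshold test).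


-- ===== PORT A =====
-- "-" * (length - 1) + "\n" ported as String.ofList of a replicated char list ++ ['\n'];
-- exact: Python string repetition with a non-positive count is "", matching Int.toNat's clamp.
def create_base_slice (height : Int) (length : Int) : List String :=
  (PySem.List.pyRange 0 height 1).foldl
    (fun baseLevel h =>
      if h < height - 2 then
        baseLevel ++ [String.ofList (List.replicate (length - 1).toNat '-' ++ ['\n'])]
      else
        baseLevel ++ [String.ofList (List.replicate (length - 1).toNat 'X' ++ ['\n'])])
    []

-- ===== PORT B =====
-- The Python while loop decrements 'remaining' from height to 0, so it runs exactly
-- height.toNat iterations; it is ported as structural recursion on that count, with the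
-- same (x_budget, rows) state, followed by the same final reverse.
def cbsLoop (length : Int) : Nat → Int → List String → List String
  | 0, _, rows => rows
  | n + 1, x_budget, rows =>
    if x_budget > 0 then
      cbsLoop length n (x_budget - 1)
        (rows ++ [String.ofList (List.replicate (length - 1).toNat 'X' ++ ['\n'])])
    else
      cbsLoop length n x_budget
        (rows ++ [String.ofList (List.replicate (length - 1).toNat '-' ++ ['\n'])])

def create_base_slice_alt (height : Int) (length : Int) : List String :=
  (cbsLoop length height.toNat 2 []).reverse

-- ===== PRECONDITION & SPEC =====
def Spec_create_base_slice (height : Int) (length : Int) (out : List String) : Prop := out = create_base_slice_alt height length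
instance (height : Int) (length : Int) (out : List String) : Decidable (Spec_create_base_slice height length out) := by unfold Spec_create_base_slice; infer_instance

-- ===== CLAIM (what is proved, stated in full; the proofs are below) =====
def Claim_equal_create_base_slice : Prop := ∀ (height : Int) (length : Int), Dom_create_base_slice height length → Spec_create_base_slice height length (create_base_slice height length)

-- ===== LEMMAS AND PROOFS =====

-- B's loop spends min(x_budget, n) X rows, then dash rows.
theorem cbsLoop_eq (length : Int) :
    ∀ (n : Nat) (x : Int) (rows : List String),
      cbsLoop length n x rows
        = rows
          ++ List.replicate (min x.toNat n) (String.ofList (List.replicate (length - 1).toNat 'X' ++ ['\n']))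
          ++ List.replicate (n - min x.toNat n) (String.ofList (List.replicate (length - 1).toNat '-' ++ ['\n'])) := by
  intro n
  induction n with
  | zero => intro x rows; simp [cbsLoop]
  | succ n ih =>
    intro x rows
    by_cases hx : x > 0
    · rw [cbsLoop, if_pos hx, ih]
      have h1 : (x - 1).toNat = x.toNat - 1 := by omega
      have h2 : min x.toNat (n + 1) = min (x.toNat - 1) n + 1 := by omega
      have h3 : n + 1 - (min (x.toNat - 1) n + 1) = n - min (x.toNat - 1) n := by omega
      rw [h1, h2, h3, List.replicate_succ]
      simp
    · rw [cbsLoop, if_neg hx, ih]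
      have h0 : x.toNat = 0 := by omega
      rw [h0]
      simp [List.replicate_succ]

-- A's fold is a map over the range; splitting the range at max 0 (height-2)
-- turns each half into a replicated constant block.
theorem create_base_slice_eq_alt (height length : Int) :
    create_base_slice height length = create_base_slice_alt height length := by
  unfold create_base_slice create_base_slice_alt
  set dRow := String.ofList (List.replicate (length - 1).toNat '-' ++ ['\n'])
  set xRow := String.ofList (List.replicate (length - 1).toNat 'X' ++ ['\n'])
  have hbody : (fun (baseLevel : List String) (h : Int) =>
        if h < height - 2 then baseLevel ++ [dRow] else baseLevel ++ [xRow])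
      = fun baseLevel h => baseLevel ++ [if h < height - 2 then dRow else xRow] := by
    funext baseLevel h; split_ifs <;> rfl
  have hfold :
      (PySem.List.pyRange 0 height 1).foldl
        (fun baseLevel h => if h < height - 2 then baseLevel ++ [dRow] else baseLevel ++ [xRow]) []
      = (PySem.List.pyRange 0 height 1).map (fun h => if h < height - 2 then dRow else xRow) := by
    rw [hbody, PySem.List.foldl_append_singleton_eq_map]; rfl
  rw [hfold, cbsLoop_eq]
  simp only [List.nil_append, List.reverse_append, List.reverse_replicate]
  by_cases hpos : 0 < height
  · have hm1 : (0 : Int) ≤ max 0 (height - 2) := le_max_left _ _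
    have hm2 : max 0 (height - 2) ≤ height := by omega
    rw [PySem.List.pyRange_one_append 0 (max 0 (height - 2)) height hm1 hm2, List.map_append]
    have hc1 : height.toNat - min (2 : Int).toNat height.toNat = (max 0 (height - 2)).toNat := by omega
    have hc2 : min (2 : Int).toNat height.toNat = (height - max 0 (height - 2)).toNat := by omega
    rw [hc1, hc2]
    congr 1
    · have : ∀ h ∈ PySem.List.pyRange 0 (max 0 (height - 2)) 1,
          (if h < height - 2 then dRow else xRow) = dRow := by
        intro h hh
        rw [PySem.List.mem_pyRange_one] at hh
        have : h < height - 2 := by omega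
        simp [this]
      rw [List.map_congr_left this, List.map_const', PySem.List.length_pyRange_one]
      congr 1
      omega
    · have : ∀ h ∈ PySem.List.pyRange (max 0 (height - 2)) height 1,
          (if h < height - 2 then dRow else xRow) = xRow := by
        intro h hh
        rw [PySem.List.mem_pyRange_one] at hh
        have : ¬ h < height - 2 := by omega
        simp [this]
      rw [List.map_congr_left this, List.map_const', PySem.List.length_pyRange_one]
  · have h1 : PySem.List.pyRange 0 height 1 = [] :=
      PySem.List.pyRange_one_eq_nil (by omega)
    have h2 : height.toNat = 0 := by omega
    rw [h1, h2]
    simp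

-- ===== VERDICT (by name: the statement is the Claim_ definition above) =====
theorem create_base_slice_spec : Claim_equal_create_base_slice := by
  intro height length _
  exact create_base_slice_eq_alt height length
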